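-- pv_equiv track=rewrite | github.com/thomasabraham/AdventOfCode | day05.py | decode_binary_encoding
-- ===== SOURCE A (Python) =====
-- def decode_binary_encoding(zero_char, one_letter, value):
--     result = 0
--     for letter in value:
--         if letter == one_letter:
--             result = result * 2 + 1
--         elif letter == zero_char:
--             result = result * 2
--         else:
--             return None
--     return result
-- ===== SOURCE B (Python) =====
-- def decode_binary_encoding(zero_char, one_letter, value):
--     # validate first, then convert via the built-in base-2 parser
--     if not set(value) <= {zero_char, one_letter}:
--         return None
--     if not value:
--         return 0
--     return int(''.join('1' if c == one_letter else '0' for c in value), 2)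
-- ===== Notes on version B (the rewrite author's own statement) =====
-- stated objective: idiomatic
-- what changed: Replaces A's per-character Horner accumulation with early return by a validate-then-convert decomposition: a set-subset validity check, then translation to '0'/'1' and the built-in base-2 int() parser (empty string handled explicitly as 0).
import Mathlib
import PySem

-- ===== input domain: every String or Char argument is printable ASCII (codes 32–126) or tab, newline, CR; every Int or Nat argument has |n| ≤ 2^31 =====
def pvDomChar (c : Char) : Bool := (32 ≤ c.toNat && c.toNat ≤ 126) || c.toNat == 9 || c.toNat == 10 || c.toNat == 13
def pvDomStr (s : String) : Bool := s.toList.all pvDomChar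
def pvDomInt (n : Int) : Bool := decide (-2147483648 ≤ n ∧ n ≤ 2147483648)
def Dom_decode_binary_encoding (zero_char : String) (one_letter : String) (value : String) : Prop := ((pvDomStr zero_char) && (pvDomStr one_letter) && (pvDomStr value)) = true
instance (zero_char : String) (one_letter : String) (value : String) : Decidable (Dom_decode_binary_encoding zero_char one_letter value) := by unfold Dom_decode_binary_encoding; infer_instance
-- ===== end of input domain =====

-- B replaces A's per-character Horner accumulation by a validate-then-convert decomposition
-- (set-subset validity check, then translate to '0'/'1' and parse base 2); objective: idiomatic.

-- ===== PORT A =====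
-- the for-loop over `value` with early `return None`, accumulator `result`
def pvDecodeGoA (zero_char : String) (one_letter : String) : List Char → Int → Option Int
  | [], result => some result
  | letter :: rest, result =>
    if String.ofList [letter] == one_letter then pvDecodeGoA zero_char one_letter rest (result * 2 + 1)
    else if String.ofList [letter] == zero_char then pvDecodeGoA zero_char one_letter rest (result * 2)
    else none

def decode_binary_encoding (zero_char : String) (one_letter : String) (value : String) : Option Int :=
  pvDecodeGoA zero_char one_letter value.toList 0

-- ===== PORT B =====
-- exact port of int(s, 2) for the strings B feeds it (nonempty, only '0'/'1' characters)
def pvParseBin2 (s : List Char) : Int :=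
  s.foldl (fun acc c => acc * 2 + (if c == '1' then 1 else 0)) 0

def decode_binary_encoding_alt (zero_char : String) (one_letter : String) (value : String) : Option Int :=
  if PySem.Set.issubset (PySem.Set.ofList (value.toList.map (fun c => String.ofList [c])))
      (PySem.Set.ofList [zero_char, one_letter]) then
    if value.toList = [] then some 0
    else some (pvParseBin2 (value.toList.map (fun c => if String.ofList [c] == one_letter then '1' else '0')))
  else none

-- ===== PRECONDITION & SPEC =====
def Spec_decode_binary_encoding (zero_char : String) (one_letter : String) (value : String) (out : Option Int) : Prop := out = decode_binary_encoding_alt zero_char one_letter value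
instance (zero_char : String) (one_letter : String) (value : String) (out : Option Int) : Decidable (Spec_decode_binary_encoding zero_char one_letter value out) := by unfold Spec_decode_binary_encoding; infer_instance

-- ===== CLAIM (what is proved, stated in full; the proofs are below) =====
def Claim_equal_decode_binary_encoding : Prop := ∀ (zero_char : String) (one_letter : String) (value : String), Dom_decode_binary_encoding zero_char one_letter value → Spec_decode_binary_encoding zero_char one_letter value (decode_binary_encoding zero_char one_letter value)

-- ===== LEMMAS AND PROOFS =====

-- A's loop, characterised: validity test plus a fold computing the Horner value from any accumulator
theorem pvDecodeGoA_eq (zero_char one_letter : String) (l : List Char) (r : Int) :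
    pvDecodeGoA zero_char one_letter l r =
      if l.all (fun c => String.ofList [c] == one_letter || String.ofList [c] == zero_char) then
        some (l.foldl (fun acc c => acc * 2 + (if String.ofList [c] == one_letter then 1 else 0)) r)
      else none := by
  induction l generalizing r with
  | nil => simp [pvDecodeGoA]
  | cons c rest ih =>
    simp only [pvDecodeGoA, List.all_cons, List.foldl_cons]
    by_cases h1 : String.ofList [c] == one_letter
    · simp [h1, ih]
    · by_cases h0 : String.ofList [c] == zero_char
      · simp [h1, h0, ih]
      · simp [h1, h0]

-- B's subset test equals A's per-character validity test
theorem pvSubset_eq_all (zero_char one_letter : String) (l : List Char) :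
    PySem.Set.issubset (PySem.Set.ofList (l.map (fun c => String.ofList [c])))
        (PySem.Set.ofList [zero_char, one_letter]) =
      l.all (fun c => String.ofList [c] == one_letter || String.ofList [c] == zero_char) := by
  rcases h : l.all (fun c => String.ofList [c] == one_letter || String.ofList [c] == zero_char) with _ | _
  · simp only [List.all_eq_false] at h
    obtain ⟨c, hc, hne⟩ := h
    apply Bool.eq_false_iff.mpr
    intro hs
    rw [PySem.Set.issubset_iff] at hs
    have := hs (String.ofList [c]) (by rw [PySem.Set.mem_ofList]; exact List.mem_map_of_mem hc)
    rw [PySem.Set.mem_ofList] at this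
    simp only [List.mem_cons, List.not_mem_nil, or_false] at this
    simp only [Bool.or_eq_true, beq_iff_eq] at hne
    push Not at hne
    rcases this with h' | h'
    · exact hne.2 h'
    · exact hne.1 h'
  · rw [PySem.Set.issubset_iff]
    intro x hx
    rw [PySem.Set.mem_ofList] at hx ⊢
    obtain ⟨c, hc, rfl⟩ := List.mem_map.mp hx
    rw [List.all_eq_true] at h
    have := h c hc
    simp only [Bool.or_eq_true, beq_iff_eq] at this
    rcases this with h' | h' <;> simp [h']

-- B's translate-then-parse equals A's fold (bit of the translated character)
theorem pvParse_eq_fold (one_letter : String) (l : List Char) :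
    pvParseBin2 (l.map (fun c => if String.ofList [c] == one_letter then '1' else '0')) =
      l.foldl (fun acc c => acc * 2 + (if String.ofList [c] == one_letter then 1 else 0)) 0 := by
  unfold pvParseBin2
  rw [List.foldl_map]
  congr 1
  funext acc c
  by_cases h : String.ofList [c] == one_letter <;> simp [h]

-- ===== VERDICT (by name: the statement is the Claim_ definition above) =====
theorem decode_binary_encoding_spec : Claim_equal_decode_binary_encoding := by
  intro zero_char one_letter value _
  unfold Spec_decode_binary_encoding decode_binary_encoding decode_binary_encoding_alt
  rw [pvDecodeGoA_eq, pvSubset_eq_all, pvParse_eq_fold]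
  rcases hv : value.toList with _ | ⟨c, rest⟩
  · simp
  · split_ifs with hall hemp
    · exact absurd hemp (by simp)
    · rfl
    · rfl
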